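-- pv_equiv track=rewrite | github.com/jameswong3388/AE_Logs_Analyzer | src/utils.py | remove_header
-- ===== SOURCE A (Python) =====
-- def remove_header(log_content):
--     lines = log_content.split('\n')
--     # Look for a more specific header pattern or use a different marker
--     header_markers = ['Log File Start', 'BEGIN LOG', '==='] # adjust these markers
--     start_index = 0
--     for i, line in enumerate(lines):
--         if any(marker in line for marker in header_markers):
--             start_index = i + 1
--             break
--     return '\n'.join(lines[start_index:])
-- ===== SOURCE B (Python) =====
-- def remove_header(log_content):
--     # Work on the raw string: earliest occurrence of any marker, then cut
--     # just past the first newline at or after it (no split/join of lines).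
--     hits = [p for p in (log_content.find(m) for m in
--                         ('Log File Start', 'BEGIN LOG', '===')) if p != -1]
--     if not hits:
--         return log_content
--     nl = log_content.find('\n', min(hits))
--     return log_content[nl + 1:] if nl != -1 else ''
-- ===== Notes on version B (the rewrite author's own statement) =====
-- stated objective: idiomatic
-- what changed: B drops the split-into-lines/enumerate/join pipeline and works on the raw string: it takes the minimum of the three marker find() positions and slices the string just past the first newline at or after it.
import Mathlib
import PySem

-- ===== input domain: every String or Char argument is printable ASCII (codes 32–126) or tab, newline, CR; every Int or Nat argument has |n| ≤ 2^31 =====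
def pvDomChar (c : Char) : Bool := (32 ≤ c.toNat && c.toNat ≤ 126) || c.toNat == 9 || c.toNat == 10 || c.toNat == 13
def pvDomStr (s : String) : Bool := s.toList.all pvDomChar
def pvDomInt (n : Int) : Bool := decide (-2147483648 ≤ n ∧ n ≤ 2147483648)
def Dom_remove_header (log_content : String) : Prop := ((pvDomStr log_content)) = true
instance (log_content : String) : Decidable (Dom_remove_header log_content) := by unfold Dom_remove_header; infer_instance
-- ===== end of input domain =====

-- B replaces A's split-into-lines/enumerate/join pipeline by raw-string scans: the minimum of
-- the three find() positions, then a cut just past the first newline at or after it.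

def pvMarkers : List (List Char) :=
  ["Log File Start".toList, "BEGIN LOG".toList, "===".toList]

-- ===== PORT A =====
-- any(marker in line for marker in header_markers)
def pvAnyM (line : List Char) : Bool :=
  pvMarkers.any (fun m => PySem.Chars.isIn m line)

-- the for-loop over enumerate(lines): start_index = i + 1 at the first hit (break), else 0
def pvFindStart : List (List Char) → Int → Int
  | [], _ => 0
  | line :: rest, i => if pvAnyM line then i + 1 else pvFindStart rest (i + 1)

def pvACore (s : List Char) : List Char :=
  PySem.Chars.join ['\n']
    (PySem.List.slice (PySem.Chars.splitOn s ['\n'])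
      (some (pvFindStart (PySem.Chars.splitOn s ['\n']) 0)) none)

def remove_header (log_content : String) : String :=
  String.ofList (pvACore log_content.toList)

-- ===== PORT B =====
-- hits = [p for p in (log_content.find(m) for m in markers) if p != -1]
def pvHits (s : List Char) : List Int :=
  (pvMarkers.map (fun m => PySem.Chars.find s m)).filter (fun p => p ≠ -1)

-- min? is none exactly on the empty list = Python's "if not hits: return log_content"
def pvBCore (s : List Char) : List Char :=
  match PySem.List.min? (pvHits s) id with
  | none => s
  | some mn =>
    if PySem.Chars.findFrom s ['\n'] mn ≠ -1 then
      PySem.List.slice s (some (PySem.Chars.findFrom s ['\n'] mn + 1)) none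
    else []

def remove_header_alt (log_content : String) : String :=
  String.ofList (pvBCore log_content.toList)

-- ===== PRECONDITION & SPEC =====
def Spec_remove_header (log_content : String) (out : String) : Prop := out = remove_header_alt log_content
instance (log_content : String) (out : String) : Decidable (Spec_remove_header log_content out) := by unfold Spec_remove_header; infer_instance

-- ===== CLAIM (what is proved, stated in full; the proofs are below) =====
def Claim_equal_remove_header : Prop := ∀ (log_content : String), Dom_remove_header log_content → Spec_remove_header log_content (remove_header log_content)

-- ===== LEMMAS AND PROOFS =====

lemma pvMarkers_ok : ∀ m ∈ pvMarkers, '\n' ∉ m ∧ m ≠ [] := by decide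

def pvSplitNl : List Char → List (List Char)
  | [] => [[]]
  | c :: rest =>
    if c = '\n' then [] :: pvSplitNl rest
    else (pvSplitNl rest).modifyHead (fun r => c :: r)

lemma pvMH_id {α : Type} (l : List α) : List.modifyHead (fun r => r) l = l := by
  cases l <;> simp [List.modifyHead]

lemma pvGo_eq (fuel : Nat) : ∀ (l cur : List Char) (acc : List (List Char)),
    l.length ≤ fuel →
    PySem.Chars.splitOn.go ['\n'] fuel l cur acc
      = acc.reverse ++ (pvSplitNl l).modifyHead (fun r => cur.reverse ++ r) := by
  induction fuel with
  | zero =>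
    intro l cur acc hl
    have : l = [] := by cases l <;> simp_all
    subst this
    rw [PySem.Chars.splitOn.go.eq_def]
    simp [pvSplitNl]
  | succ fuel ih =>
    intro l cur acc hl
    rw [PySem.Chars.splitOn.go.eq_def]
    cases l with
    | nil => simp [pvSplitNl]
    | cons c rest =>
      simp only [List.isPrefixOf, Bool.and_true]
      by_cases hc : c = '\n'
      · subst hc
        simp only [beq_self_eq_true, if_pos]
        rw [ih _ _ _ (by simpa using Nat.le_of_succ_le_succ (by simpa using hl))]
        simp [pvSplitNl, pvMH_id]
      · rw [if_neg (by simp [Ne.symm hc])]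
        rw [ih _ _ _ (by simpa using Nat.le_of_succ_le_succ (by simpa using hl))]
        simp only [pvSplitNl, if_neg hc]
        cases h : pvSplitNl rest with
        | nil => simp
        | cons r rs => simp [List.modifyHead]

lemma pvSplitOn_eq (s : List Char) : PySem.Chars.splitOn s ['\n'] = pvSplitNl s := by
  show PySem.Chars.splitOn.go _ _ _ _ _ = _
  rw [pvGo_eq (s.length + 1) s [] [] (by omega)]
  simp [pvMH_id]

lemma pvSplitNl_ne_nil (s : List Char) : pvSplitNl s ≠ [] := by
  induction s with
  | nil => simp [pvSplitNl]
  | cons c rest ih =>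
    simp only [pvSplitNl]
    split
    · simp
    · cases h : pvSplitNl rest with
      | nil => exact absurd h ih
      | cons r rs => simp [List.modifyHead]

lemma pvSplitNl_no_nl {s : List Char} (h : '\n' ∉ s) : pvSplitNl s = [s] := by
  induction s with
  | nil => rfl
  | cons c rest ih =>
    simp only [List.mem_cons, not_or] at h
    simp [pvSplitNl, Ne.symm h.1, ih h.2, List.modifyHead]

lemma pvSplitNl_append {h t : List Char} (hh : '\n' ∉ h) :
    pvSplitNl (h ++ '\n' :: t) = h :: pvSplitNl t := by
  induction h with
  | nil => simp [pvSplitNl]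
  | cons c rest ih =>
    simp only [List.mem_cons, not_or] at hh
    simp [pvSplitNl, Ne.symm hh.1, ih hh.2, List.modifyHead]

lemma pvJoin_splitNl (s : List Char) : PySem.Chars.join ['\n'] (pvSplitNl s) = s := by
  induction s with
  | nil => simp [pvSplitNl, PySem.Chars.join_singleton]
  | cons c rest ih =>
    by_cases hc : c = '\n'
    · subst hc
      rw [show pvSplitNl ('\n' :: rest) = [] :: pvSplitNl rest by simp [pvSplitNl]]
      cases h : pvSplitNl rest with
      | nil => exact absurd h (pvSplitNl_ne_nil rest)
      | cons r rs =>
        rw [PySem.Chars.join_cons_cons, ← h, ih]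
        simp
    · rw [show pvSplitNl (c :: rest) = (pvSplitNl rest).modifyHead (fun r => c :: r) by
        simp [pvSplitNl, hc]]
      cases h : pvSplitNl rest with
      | nil => exact absurd h (pvSplitNl_ne_nil rest)
      | cons r rs =>
        cases rs with
        | nil =>
          simp only [List.modifyHead, PySem.Chars.join_singleton]
          have := ih; rw [h, PySem.Chars.join_singleton] at this
          rw [this]
        | cons q qs =>
          simp only [List.modifyHead]
          rw [PySem.Chars.join_cons_cons]
          rw [h, PySem.Chars.join_cons_cons] at ih
          simp only [List.cons_append]
          rw [ih]

lemma pvExists_split {s : List Char} (h : '\n' ∈ s) :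
    ∃ a b : List Char, s = a ++ '\n' :: b ∧ '\n' ∉ a := by
  induction s with
  | nil => simp at h
  | cons c rest ih =>
    by_cases hc : c = '\n'
    · exact ⟨[], rest, by simp [hc], by simp⟩
    · have : '\n' ∈ rest := by
        rcases List.mem_cons.mp h with h1 | h1
        · exact absurd h1.symm hc
        · exact h1
      obtain ⟨a, b, rfl, ha⟩ := ih this
      exact ⟨c :: a, b, rfl, by simp [ha, Ne.symm hc]⟩

lemma pvPrefix_no_nl {m g t : List Char} (hm : '\n' ∉ m) :
    m <+: g ++ '\n' :: t ↔ m <+: g := by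
  constructor
  · intro hp
    obtain ⟨r, hr⟩ := hp
    have h1 : (g ++ '\n' :: t).take m.length = m := by rw [← hr, List.take_left]
    by_cases hl : m.length ≤ g.length
    · rw [List.take_append_of_le_length hl] at h1
      rw [← h1]
      exact List.take_prefix _ _
    · exfalso
      apply hm
      have h2 : m.length - g.length = (m.length - g.length - 1) + 1 := by omega
      rw [← h1, List.take_append, h2, List.take_succ_cons]
      simp
  · intro hp
    exact hp.trans ⟨'\n' :: t, rfl⟩

lemma pvDrop_append_le {h t : List Char} {i : Nat} (hi : i ≤ h.length) :
    (h ++ '\n' :: t).drop i = h.drop i ++ '\n' :: t := by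
  rw [List.drop_append, Nat.sub_eq_zero_of_le hi, List.drop_zero]

lemma pvDrop_append_gt (h t : List Char) (k : Nat) :
    (h ++ '\n' :: t).drop (h.length + 1 + k) = t.drop k := by
  rw [List.drop_append]
  have : h.length + 1 + k - h.length = k + 1 := by omega
  simp [this, List.drop_eq_nil_of_le (by omega : h.length ≤ h.length + 1 + k)]

lemma pvInfix_of_prefix_drop {m s : List Char} {i : Nat} (hp : m <+: s.drop i) :
    m <:+: s := by
  obtain ⟨r, hr⟩ := hp
  exact ⟨s.take i, r, by rw [List.append_assoc, hr, List.take_append_drop]⟩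

lemma pvOcc_cases {m h t : List Char} (hm : '\n' ∉ m) (i : Nat)
    (hp : m <+: (h ++ '\n' :: t).drop i) : m <:+: h ∨ m <:+: t := by
  by_cases hi : i ≤ h.length
  · rw [pvDrop_append_le hi, pvPrefix_no_nl hm] at hp
    exact Or.inl (pvInfix_of_prefix_drop hp)
  · have h2 : i = h.length + 1 + (i - h.length - 1) := by omega
    rw [h2, pvDrop_append_gt] at hp
    exact Or.inr (pvInfix_of_prefix_drop hp)

lemma pvInfix_iff_exists_drop {m s : List Char} :
    m <:+: s ↔ ∃ i, m <+: s.drop i := by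
  rw [← PySem.Chars.isIn_iff_infix, ← PySem.Chars.exists_prefix_drop_iff_isIn]

lemma pvInfix_split {m h t : List Char} (hm : '\n' ∉ m) :
    m <:+: h ++ '\n' :: t ↔ m <:+: h ∨ m <:+: t := by
  constructor
  · intro hi
    obtain ⟨i, hp⟩ := pvInfix_iff_exists_drop.mp hi
    exact pvOcc_cases hm i hp
  · rintro (h1 | h1)
    · exact h1.trans ⟨[], '\n' :: t, by simp⟩
    · exact h1.trans ⟨h ++ ['\n'], [], by simp⟩

lemma pvFind_eq_of {s m : List Char} (p : Nat) (h1 : m <+: s.drop p)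
    (h2 : ∀ i < p, ¬ m <+: s.drop i) : PySem.Chars.find s m = (p : Int) := by
  have hinf : m <:+: s := pvInfix_of_prefix_drop h1
  have hge : 0 ≤ PySem.Chars.find s m := (PySem.Chars.find_nonneg_iff s m).mpr hinf
  obtain ⟨hsp, hmin⟩ := PySem.Chars.find_spec hge
  rcases Nat.lt_trichotomy (PySem.Chars.find s m).toNat p with hlt | heq | hgt
  · exact absurd hsp (h2 _ hlt)
  · omega
  · exact absurd h1 (hmin p hgt)

lemma pvFind_lt_of_infix {h m : List Char} (hinf : m <:+: h) (hne : m ≠ []) :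
    0 ≤ PySem.Chars.find h m ∧ PySem.Chars.find h m < h.length := by
  have hge : 0 ≤ PySem.Chars.find h m := (PySem.Chars.find_nonneg_iff h m).mpr hinf
  obtain ⟨hsp, -⟩ := PySem.Chars.find_spec hge
  refine ⟨hge, ?_⟩
  have hlen : m.length ≤ (h.drop (PySem.Chars.find h m).toNat).length := hsp.length_le
  have hml : 1 ≤ m.length := by cases m <;> simp_all
  have := PySem.Chars.find_le_length h m
  simp only [List.length_drop] at hlen
  omega

lemma pvFind_left {m h t : List Char} (hm : '\n' ∉ m) (hne : m ≠ [])
    (hinf : m <:+: h) :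
    PySem.Chars.find (h ++ '\n' :: t) m = PySem.Chars.find h m := by
  obtain ⟨hge, hlt⟩ := pvFind_lt_of_infix hinf hne
  obtain ⟨hsp, hmin⟩ := PySem.Chars.find_spec hge
  set p := (PySem.Chars.find h m).toNat with hp
  have hple : p ≤ h.length := by omega
  have h1 : m <+: (h ++ '\n' :: t).drop p := by
    rw [pvDrop_append_le hple]
    exact hsp.trans ⟨'\n' :: t, rfl⟩  -- m <+: drop p h → <+: drop p h ++ _
  have h2 : ∀ i < p, ¬ m <+: (h ++ '\n' :: t).drop i := by
    intro i hi hcon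
    rw [pvDrop_append_le (by omega), pvPrefix_no_nl hm] at hcon
    exact hmin i hi hcon
  rw [pvFind_eq_of p h1 h2]
  omega

lemma pvFind_right {m h t : List Char} (hm : '\n' ∉ m) (hnh : ¬ m <:+: h) :
    PySem.Chars.find (h ++ '\n' :: t) m
      = if PySem.Chars.find t m = -1 then -1
        else ((h.length : Int) + 1) + PySem.Chars.find t m := by
  by_cases hft : PySem.Chars.find t m = -1
  · rw [if_pos hft]
    rw [PySem.Chars.find_eq_neg_one_iff] at hft ⊢
    intro hcon
    rcases (pvInfix_split hm).mp hcon with h1 | h1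
    · exact hnh h1
    · exact hft h1
  · rw [if_neg hft]
    have hge : 0 ≤ PySem.Chars.find t m := by
      have := PySem.Chars.neg_one_le_find t m; omega
    obtain ⟨hsp, hmin⟩ := PySem.Chars.find_spec hge
    set q := (PySem.Chars.find t m).toNat with hq
    have h1 : m <+: (h ++ '\n' :: t).drop (h.length + 1 + q) := by
      rw [pvDrop_append_gt]; exact hsp
    have h2 : ∀ i < h.length + 1 + q, ¬ m <+: (h ++ '\n' :: t).drop i := by
      intro i hi hcon
      by_cases hih : i ≤ h.length
      · rw [pvDrop_append_le hih, pvPrefix_no_nl hm] at hcon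
        exact hnh (pvInfix_of_prefix_drop hcon)
      · have h3 : i = h.length + 1 + (i - h.length - 1) := by omega
        rw [h3, pvDrop_append_gt] at hcon
        exact hmin _ (by omega) hcon
    rw [pvFind_eq_of _ h1 h2]
    push_cast
    omega

lemma pvFindNl_left {h t : List Char} (hh : '\n' ∉ h) {k : Nat} (hk : k ≤ h.length) :
    PySem.Chars.findFrom (h ++ '\n' :: t) ['\n'] (k : Int) = (h.length : Int) := by
  have hkS : k ≤ (h ++ '\n' :: t).length := by simp; omega
  rw [PySem.Chars.findFrom_natCast _ _ k hkS, pvDrop_append_le hk]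
  have hfind : PySem.Chars.find (h.drop k ++ '\n' :: t) ['\n'] = ((h.length - k : Nat) : Int) := by
    apply pvFind_eq_of
    · have : (h.drop k ++ '\n' :: t).drop (h.length - k) = '\n' :: t := by
        rw [List.drop_append, List.length_drop, Nat.sub_self, List.drop_zero,
          List.drop_eq_nil_of_le (by simp), List.nil_append]
      rw [this]
      exact ⟨t, rfl⟩
    · intro i hi hcon
      have hig : i < (h.drop k).length := by simp; omega
      rw [pvDrop_append_le (by omega : i ≤ (h.drop k).length),
        List.drop_eq_getElem_cons hig] at hcon
      have := (List.cons_prefix_cons.mp hcon).1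
      exact hh (List.mem_of_mem_drop (this ▸ List.getElem_mem hig))
  rw [hfind]
  have : ((h.length - k : Nat) : Int) ≠ -1 := by omega
  rw [if_neg this]
  omega

lemma pvFindNl_right {h t : List Char} (k : Nat) (hk : k ≤ t.length) :
    PySem.Chars.findFrom (h ++ '\n' :: t) ['\n'] ((h.length : Int) + 1 + (k : Int)) =
      if PySem.Chars.findFrom t ['\n'] (k : Int) = -1 then -1
      else ((h.length : Int) + 1) + PySem.Chars.findFrom t ['\n'] (k : Int) := by
  have e1 : ((h.length : Int) + 1 + (k : Int)) = ((h.length + 1 + k : Nat) : Int) := by push_cast; ring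
  have hkS : h.length + 1 + k ≤ (h ++ '\n' :: t).length := by simp; omega
  rw [e1, PySem.Chars.findFrom_natCast _ _ _ hkS, pvDrop_append_gt,
    PySem.Chars.findFrom_natCast _ _ _ hk]
  by_cases hF : PySem.Chars.find (t.drop k) ['\n'] = -1
  · simp [hF]
  · have hge : 0 ≤ PySem.Chars.find (t.drop k) ['\n'] := by
      have := PySem.Chars.neg_one_le_find (t.drop k) ['\n']; omega
    rw [if_neg hF, if_neg hF,
      if_neg (show ¬((k : Int) + PySem.Chars.find (t.drop k) ['\n'] = -1) by omega)]
    push_cast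
    ring

lemma pvFindStart_shift (ls : List (List Char)) (i : Int) :
    pvFindStart ls (i + 1) = if ls.any pvAnyM then pvFindStart ls i + 1 else 0 := by
  induction ls generalizing i with
  | nil => simp [pvFindStart]
  | cons line rest ih =>
    by_cases hl : pvAnyM line
    · simp [pvFindStart, hl]
    · simp only [pvFindStart, List.any_cons, hl, Bool.false_or]
      rw [ih (i + 1)]
      simp

lemma pvFindStart_nonneg (ls : List (List Char)) (i : Int) (hi : 0 ≤ i) :
    0 ≤ pvFindStart ls i := by
  induction ls generalizing i with
  | nil => simp [pvFindStart]
  | cons line rest ih =>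
    simp only [pvFindStart]
    split
    · omega
    · exact ih (i + 1) (by omega)

lemma pvHits_mem {s : List Char} {p : Int} (hp : p ∈ pvHits s) :
    0 ≤ p ∧ p ≤ s.length ∧ ∃ m ∈ pvMarkers, PySem.Chars.find s m = p := by
  simp only [pvHits, List.mem_filter, List.mem_map, decide_eq_true_eq] at hp
  obtain ⟨⟨m, hm, rfl⟩, hne⟩ := hp
  refine ⟨?_, PySem.Chars.find_le_length s m, m, hm, rfl⟩
  have := PySem.Chars.neg_one_le_find s m
  omega

lemma pvHits_empty_iff (s : List Char) :
    pvHits s = [] ↔ ∀ m ∈ pvMarkers, ¬ m <:+: s := by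
  simp only [pvHits, List.filter_eq_nil_iff, List.mem_map, decide_eq_true_eq]
  constructor
  · intro H m hm
    rw [← PySem.Chars.find_eq_neg_one_iff]
    by_contra hne
    exact (H _ ⟨m, hm, rfl⟩) hne
  · rintro H p ⟨m, hm, rfl⟩ hne
    exact hne ((PySem.Chars.find_eq_neg_one_iff s m).mpr (H m hm))

lemma pvAny_lines' (n : Nat) : ∀ s : List Char, s.length ≤ n →
    (pvSplitNl s).any pvAnyM = pvMarkers.any (fun m => PySem.Chars.isIn m s) := by
  induction n with
  | zero =>
    intro s hs
    have : s = [] := by cases s <;> simp_all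
    subst this; decide
  | succ n ih =>
    intro s hs
    by_cases hnl : '\n' ∈ s
    · obtain ⟨h, t, rfl, hh⟩ := pvExists_split hnl
      rw [pvSplitNl_append hh, List.any_cons, ih t (by simp at hs; omega)]
      rw [Bool.eq_iff_iff]
      simp only [Bool.or_eq_true, List.any_eq_true, pvAnyM]
      constructor
      · rintro (⟨m, hm, hin⟩ | ⟨m, hm, hin⟩)
        · exact ⟨m, hm, by
            rw [PySem.Chars.isIn_iff_infix] at hin ⊢
            exact (pvInfix_split (pvMarkers_ok m hm).1).mpr (Or.inl hin)⟩
        · exact ⟨m, hm, by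
            rw [PySem.Chars.isIn_iff_infix] at hin ⊢
            exact (pvInfix_split (pvMarkers_ok m hm).1).mpr (Or.inr hin)⟩
      · rintro ⟨m, hm, hin⟩
        rw [PySem.Chars.isIn_iff_infix] at hin
        rcases (pvInfix_split (pvMarkers_ok m hm).1).mp hin with h1 | h1
        · exact Or.inl ⟨m, hm, (PySem.Chars.isIn_iff_infix _ _).mpr h1⟩
        · exact Or.inr ⟨m, hm, (PySem.Chars.isIn_iff_infix _ _).mpr h1⟩
    · rw [pvSplitNl_no_nl hnl]
      simp [pvAnyM]

lemma pvFilter_map_shift (M : List (List Char)) (S t : List Char) (c : Int) (hc : 0 ≤ c)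
    (H : ∀ mk ∈ M, PySem.Chars.find S mk
        = if PySem.Chars.find t mk = -1 then -1 else c + PySem.Chars.find t mk) :
    (M.map (fun m => PySem.Chars.find S m)).filter (fun p => p ≠ -1)
      = ((M.map (fun m => PySem.Chars.find t m)).filter (fun p => p ≠ -1)).map
          (fun x => c + x) := by
  induction M with
  | nil => simp
  | cons mk M' ih =>
    have hmk := H mk (by simp)
    have ih' := ih (fun m hm => H m (by simp [hm]))
    by_cases hft : PySem.Chars.find t mk = -1
    · rw [if_pos hft] at hmk
      simp only [List.map_cons, List.filter_cons, hmk, hft]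
      simpa using ih'
    · rw [if_neg hft] at hmk
      have hge : 0 ≤ PySem.Chars.find t mk := by
        have := PySem.Chars.neg_one_le_find t mk; omega
      simp only [List.map_cons, List.filter_cons, hmk]
      rw [if_pos (by simpa using by omega : decide (c + PySem.Chars.find t mk ≠ -1) = true),
        if_pos (by simpa using hft : decide (PySem.Chars.find t mk ≠ -1) = true)]
      simp only [List.map_cons]
      rw [ih']

def pvStep (acc : Option Int) (x : Int) : Option Int :=
  match acc with
  | none => some x
  | some m => if x < m then some x else some m

lemma pvMin?_eq_foldl_step (l : List Int) :
    PySem.List.min? l id = List.foldl pvStep none l := by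
  unfold PySem.List.min?
  congr 1
  funext acc x
  cases acc <;> rfl

lemma pvFoldl_min_map (c : Int) : ∀ (l : List Int) (acc : Option Int),
    List.foldl pvStep (Option.map (fun y => c + y) acc) (l.map (fun y => c + y))
      = Option.map (fun y => c + y) (List.foldl pvStep acc l) := by
  intro l
  induction l with
  | nil => intro acc; simp
  | cons x rest ih =>
    intro acc
    simp only [List.map_cons, List.foldl_cons]
    have hstep : pvStep (Option.map (fun y => c + y) acc) (c + x)
        = Option.map (fun y => c + y) (pvStep acc x) := by
      cases acc with
      | none => rfl
      | some m =>
        by_cases hxm : x < m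
        · simp [pvStep, hxm]
        · simp [pvStep, hxm]
    rw [hstep, ih]

lemma pvMin?_map_add (c : Int) (l : List Int) :
    PySem.List.min? (l.map (fun y => c + y)) id
      = Option.map (fun y => c + y) (PySem.List.min? l id) := by
  rw [pvMin?_eq_foldl_step, pvMin?_eq_foldl_step]
  simpa using pvFoldl_min_map c l none

lemma pvFindFrom_nonneg {t : List Char} (k : Nat) (hk : k ≤ t.length)
    (hne : PySem.Chars.findFrom t ['\n'] (k : Int) ≠ -1) :
    0 ≤ PySem.Chars.findFrom t ['\n'] (k : Int) := by
  rw [PySem.Chars.findFrom_natCast _ _ k hk] at hne ⊢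
  split at hne
  · omega
  · split
    · omega
    · have := PySem.Chars.neg_one_le_find (t.drop k) ['\n']
      omega

-- the no-newline case of the main equivalence
lemma pvNoNl_case {s : List Char} (hnl : '\n' ∉ s) : pvACore s = pvBCore s := by
  have hlines : PySem.Chars.splitOn s ['\n'] = [s] := by
    rw [pvSplitOn_eq, pvSplitNl_no_nl hnl]
  by_cases hm : ∃ m ∈ pvMarkers, m <:+: s
  · -- the single line carries a marker: A returns '' and so does B
    have hA : pvAnyM s = true := by
      obtain ⟨m, hmm, hinf⟩ := hm
      simp only [pvAnyM, List.any_eq_true]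
      exact ⟨m, hmm, (PySem.Chars.isIn_iff_infix _ _).mpr hinf⟩
    have hAcore : pvACore s = [] := by
      rw [pvACore, hlines]
      rw [show pvFindStart [s] 0 = 1 by simp [pvFindStart, hA]]
      rw [PySem.List.slice_from _ (by omega)]
      simp [PySem.Chars.join_nil]
    obtain ⟨m₀, hm₀, hinf₀⟩ := hm
    have hfge : 0 ≤ PySem.Chars.find s m₀ := (PySem.Chars.find_nonneg_iff s m₀).mpr hinf₀
    have hmem : PySem.Chars.find s m₀ ∈ pvHits s := by
      simp only [pvHits, List.mem_filter, List.mem_map, decide_eq_true_eq]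
      exact ⟨⟨m₀, hm₀, rfl⟩, by omega⟩
    rw [hAcore, pvBCore]
    cases hmin : PySem.List.min? (pvHits s) id with
    | none =>
      rw [PySem.List.min?_eq_none_iff] at hmin
      rw [hmin] at hmem
      simp at hmem
    | some mn =>
      obtain ⟨hge, hle, -⟩ := pvHits_mem (PySem.List.min?_mem hmin)
      have hnlf : PySem.Chars.findFrom s ['\n'] mn = -1 := by
        rw [show mn = ((mn.toNat : Nat) : Int) by omega,
          PySem.Chars.findFrom_natCast _ _ mn.toNat (by omega)]
        rw [show PySem.Chars.find (s.drop mn.toNat) ['\n'] = -1 from ?_]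
        · simp
        · rw [PySem.Chars.find_eq_neg_one_iff]
          intro hcon
          have : '\n' ∈ s.drop mn.toNat := by
            obtain ⟨p, q, hpq⟩ := hcon
            rw [← hpq]; simp
          exact hnl (List.mem_of_mem_drop this)
      dsimp only
      simp [hnlf]
  · -- no marker: both return the input unchanged
    have hA : pvAnyM s = false := by
      simp only [pvAnyM, List.any_eq_false]
      intro m hmm
      simp only [PySem.Chars.isIn_iff_infix]
      exact fun hinf => hm ⟨m, hmm, hinf⟩
    have hhits : pvHits s = [] := (pvHits_empty_iff s).mpr (fun m hmm hinf => hm ⟨m, hmm, hinf⟩)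
    rw [pvACore, hlines]
    rw [show pvFindStart [s] 0 = 0 by simp [pvFindStart, hA]]
    rw [PySem.List.slice_from _ (by omega)]
    rw [pvBCore, hhits]
    simp [PySem.List.min?, PySem.Chars.join_singleton]

lemma pvMain (n : Nat) : ∀ s : List Char, s.length ≤ n → pvACore s = pvBCore s := by
  induction n with
  | zero =>
    intro s hs
    have : s = [] := by cases s <;> simp_all
    subst this
    exact pvNoNl_case (by simp)
  | succ n ih =>
    intro s hs
    by_cases hnl : '\n' ∈ s
    · obtain ⟨h, t, rfl, hh⟩ := pvExists_split hnl
      have hlen : t.length ≤ n := by simp at hs; omega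
      have hlines : PySem.Chars.splitOn (h ++ '\n' :: t) ['\n'] = h :: pvSplitNl t := by
        rw [pvSplitOn_eq, pvSplitNl_append hh]
      by_cases hmh : ∃ m ∈ pvMarkers, m <:+: h
      · -- (a) a marker occurs in the first line h: both return t
        have hA : pvAnyM h = true := by
          obtain ⟨m, hmm, hinf⟩ := hmh
          simp only [pvAnyM, List.any_eq_true]
          exact ⟨m, hmm, (PySem.Chars.isIn_iff_infix _ _).mpr hinf⟩
        have hAcore : pvACore (h ++ '\n' :: t) = t := by
          rw [pvACore, hlines]
          rw [show pvFindStart (h :: pvSplitNl t) 0 = 1 by simp [pvFindStart, hA]]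
          rw [PySem.List.slice_from _ (by omega)]
          simpa using pvJoin_splitNl t
        obtain ⟨m₀, hm₀, hinf₀⟩ := hmh
        obtain ⟨hmnl, hmne⟩ := pvMarkers_ok m₀ hm₀
        obtain ⟨hfge, hflt⟩ := pvFind_lt_of_infix hinf₀ hmne
        have hfeq : PySem.Chars.find (h ++ '\n' :: t) m₀ = PySem.Chars.find h m₀ :=
          pvFind_left hmnl hmne hinf₀
        have hmem : PySem.Chars.find (h ++ '\n' :: t) m₀ ∈ pvHits (h ++ '\n' :: t) := by
          simp only [pvHits, List.mem_filter, List.mem_map, decide_eq_true_eq]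
          exact ⟨⟨m₀, hm₀, rfl⟩, by omega⟩
        rw [hAcore, pvBCore]
        cases hmin : PySem.List.min? (pvHits (h ++ '\n' :: t)) id with
        | none =>
          rw [PySem.List.min?_eq_none_iff] at hmin
          rw [hmin] at hmem
          simp at hmem
        | some mn =>
          obtain ⟨hge, -, -⟩ := pvHits_mem (PySem.List.min?_mem hmin)
          have hmnlt : mn < h.length := by
            have := PySem.List.min?_isMin hmin _ hmem
            simp only [id] at this
            omega
          have hnlf : PySem.Chars.findFrom (h ++ '\n' :: t) ['\n'] mn = (h.length : Int) := by
            rw [show mn = ((mn.toNat : Nat) : Int) by omega]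
            exact pvFindNl_left hh (by omega)
          dsimp only
          rw [hnlf, if_pos (by omega : (h.length : Int) ≠ -1)]
          rw [show (h.length : Int) + 1 = ((h.length + 1 + 0 : Nat) : Int) by push_cast; ring]
          rw [PySem.List.slice_from _ (by omega), Int.toNat_natCast, pvDrop_append_gt]
          simp
      · by_cases hmt : ∃ m ∈ pvMarkers, m <:+: t
        · -- (b) no marker in h, a marker further down: both recurse to t
          have hA : pvAnyM h = false := by
            simp only [pvAnyM, List.any_eq_false]
            intro m hmm
            simp only [PySem.Chars.isIn_iff_infix]
            exact fun hinf => hmh ⟨m, hmm, hinf⟩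
          have hanyt : (pvSplitNl t).any pvAnyM = true := by
            rw [pvAny_lines' t.length t le_rfl]
            obtain ⟨m, hmm, hinf⟩ := hmt
            simp only [List.any_eq_true]
            exact ⟨m, hmm, (PySem.Chars.isIn_iff_infix _ _).mpr hinf⟩
          have hstge : 0 ≤ pvFindStart (pvSplitNl t) 0 := pvFindStart_nonneg _ 0 le_rfl
          have hAeq : pvACore (h ++ '\n' :: t) = pvACore t := by
            rw [pvACore, pvACore, hlines, pvSplitOn_eq t]
            rw [show pvFindStart (h :: pvSplitNl t) 0 = pvFindStart (pvSplitNl t) 1 by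
              simp [pvFindStart, hA]]
            rw [show (1 : Int) = 0 + 1 from rfl, pvFindStart_shift, if_pos hanyt]
            rw [PySem.List.slice_from _ (by omega), PySem.List.slice_from _ hstge]
            rw [show (pvFindStart (pvSplitNl t) 0 + 1).toNat
                = (pvFindStart (pvSplitNl t) 0).toNat + 1 by omega]
            rw [List.drop_succ_cons]
          have hBeq : pvBCore (h ++ '\n' :: t) = pvBCore t := by
            have hH : ∀ mk ∈ pvMarkers, PySem.Chars.find (h ++ '\n' :: t) mk
                = if PySem.Chars.find t mk = -1 then -1
                  else ((h.length : Int) + 1) + PySem.Chars.find t mk := by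
              intro mk hmk
              exact pvFind_right (pvMarkers_ok mk hmk).1 (fun hinf => hmh ⟨mk, hmk, hinf⟩)
            have hhits : pvHits (h ++ '\n' :: t)
                = (pvHits t).map (fun x => ((h.length : Int) + 1) + x) := by
              rw [pvHits, pvHits]
              exact pvFilter_map_shift _ _ _ _ (by omega) hH
            obtain ⟨m₁, hm₁, hinf₁⟩ := hmt
            have hfge₁ : 0 ≤ PySem.Chars.find t m₁ := (PySem.Chars.find_nonneg_iff t m₁).mpr hinf₁
            have hmem₁ : PySem.Chars.find t m₁ ∈ pvHits t := by
              simp only [pvHits, List.mem_filter, List.mem_map, decide_eq_true_eq]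
              exact ⟨⟨m₁, hm₁, rfl⟩, by omega⟩
            cases hmin : PySem.List.min? (pvHits t) id with
            | none =>
              rw [PySem.List.min?_eq_none_iff] at hmin
              rw [hmin] at hmem₁
              simp at hmem₁
            | some mt =>
              obtain ⟨hge, hle, -⟩ := pvHits_mem (PySem.List.min?_mem hmin)
              have hminS : PySem.List.min? (pvHits (h ++ '\n' :: t)) id
                  = some (((h.length : Int) + 1) + mt) := by
                rw [hhits, pvMin?_map_add, hmin]
                rfl
              rw [pvBCore, hminS]
              rw [pvBCore, hmin]
              dsimp only
              have hcast : ((h.length : Int) + 1) + mt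
                  = (h.length : Int) + 1 + ((mt.toNat : Nat) : Int) := by omega
              have hnlS : PySem.Chars.findFrom (h ++ '\n' :: t) ['\n']
                    (((h.length : Int) + 1) + mt)
                  = if PySem.Chars.findFrom t ['\n'] mt = -1 then -1
                    else ((h.length : Int) + 1) + PySem.Chars.findFrom t ['\n'] mt := by
                rw [hcast, pvFindNl_right mt.toNat (by omega)]
                rw [show ((mt.toNat : Nat) : Int) = mt by omega]
              by_cases hnlt : PySem.Chars.findFrom t ['\n'] mt = -1
              · rw [hnlS, if_pos hnlt, if_neg (by simp), if_neg (by simp [hnlt])]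
              · have hnltge : 0 ≤ PySem.Chars.findFrom t ['\n'] mt := by
                  have := pvFindFrom_nonneg (t := t) mt.toNat (by omega)
                  rw [show ((mt.toNat : Nat) : Int) = mt by omega] at this
                  exact this hnlt
                rw [hnlS, if_neg hnlt,
                  if_pos (show ((h.length : Int) + 1) + PySem.Chars.findFrom t ['\n'] mt ≠ -1
                    by omega),
                  if_pos hnlt]
                rw [PySem.List.slice_from _ (by omega), PySem.List.slice_from _ (by omega)]
                rw [show ((h.length : Int) + 1 + PySem.Chars.findFrom t ['\n'] mt + 1).toNat
                    = h.length + 1 + (PySem.Chars.findFrom t ['\n'] mt + 1).toNat by omega]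
                rw [pvDrop_append_gt]
          rw [hAeq, hBeq]
          exact ih t hlen
        · -- (c) no marker anywhere: both return the input unchanged
          have hA : pvAnyM h = false := by
            simp only [pvAnyM, List.any_eq_false]
            intro m hmm
            simp only [PySem.Chars.isIn_iff_infix]
            exact fun hinf => hmh ⟨m, hmm, hinf⟩
          have hanyt : (pvSplitNl t).any pvAnyM = false := by
            rw [pvAny_lines' t.length t le_rfl]
            simp only [List.any_eq_false]
            intro m hmm
            simp only [PySem.Chars.isIn_iff_infix]
            exact fun hinf => hmt ⟨m, hmm, hinf⟩
          have hhits : pvHits (h ++ '\n' :: t) = [] := by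
            rw [pvHits_empty_iff]
            intro m hmm hinf
            rcases (pvInfix_split (pvMarkers_ok m hmm).1).mp hinf with h1 | h1
            · exact hmh ⟨m, hmm, h1⟩
            · exact hmt ⟨m, hmm, h1⟩
          rw [pvACore, hlines]
          rw [show pvFindStart (h :: pvSplitNl t) 0 = pvFindStart (pvSplitNl t) 1 by
            simp [pvFindStart, hA]]
          rw [show (1 : Int) = 0 + 1 from rfl, pvFindStart_shift, if_neg (by simp [hanyt])]
          rw [PySem.List.slice_from _ (by omega)]
          rw [pvBCore, hhits]
          simp only [Int.toNat_zero, List.drop_zero]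
          rw [show h :: pvSplitNl t = pvSplitNl (h ++ '\n' :: t) from (pvSplitNl_append hh).symm]
          rw [pvJoin_splitNl]
          rfl
    · exact pvNoNl_case hnl

-- ===== VERDICT (by name: the statement is the Claim_ definition above) =====
theorem remove_header_spec : Claim_equal_remove_header := by
  intro lc _
  show remove_header lc = remove_header_alt lc
  unfold remove_header remove_header_alt
  rw [pvMain lc.toList.length lc.toList le_rfl]
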